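-- pv_equiv track=rewrite | github.com/serim53/Algorithm | Programmers/코딩테스트 고득점 Kit/완전탐색/P_Level1_모의고사.py | solution
-- ===== SOURCE A (Python) =====
-- def solution(answers):
--
--     st1 = [1, 2, 3, 4, 5]
--     st2 = [2, 1, 2, 3, 2, 4, 2, 5]
--     st3 = [3, 3, 1, 1, 2, 2, 4, 4, 5, 5]
--
--     right = [0, 0, 0]
--
--     for i in range(len(answers)):
--         if answers[i] == st1[i % len(st1)]:
--             right[0] += 1
--         if answers[i] == st2[i % len(st2)]:
--             right[1] += 1
--         if answers[i] == st3[i % len(st3)]: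
--             right[2] += 1
--
--     res = []
--     for i in range(len(right)):
--         if right[i] == max(right):
--             res.append(i + 1)
--
--
--     return sorted(res)
-- ===== SOURCE B (Python) =====
-- def solution(answers):
--     patterns = [[1, 2, 3, 4, 5],
--                 [2, 1, 2, 3, 2, 4, 2, 5],
--                 [3, 3, 1, 1, 2, 2, 4, 4, 5, 5]]
--     L = 40  # common period: lcm of the three pattern lengths
--     # One pass: histogram of answer values per index-residue class mod 40.
--     hist = [{} for _ in range(L)]
--     for i, a in enumerate(answers):
--         h = hist[i % L]
--         h[a] = h.get(a, 0) + 1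
--     # Each pattern's score is 40 table lookups, no scan of answers.
--     scores = [sum(h.get(p[r % len(p)], 0) for r, h in enumerate(hist))
--               for p in patterns]
--     best = max(scores)
--     return [k + 1 for k, s in enumerate(scores) if s == best]
-- ===== Notes on version B (the rewrite author's own statement) =====
-- stated objective: alternative
-- what changed: B replaces A's direct per-answer match counting against the three cyclic patterns by a residue-class histogram: one pass buckets answer values by index mod 40 (the patterns' common period) into per-residue counters, and each pattern's score is then read off as 40 dictionary lookups instead of a scan over the answers; max is taken once and the result built in order.
import Mathlib
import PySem

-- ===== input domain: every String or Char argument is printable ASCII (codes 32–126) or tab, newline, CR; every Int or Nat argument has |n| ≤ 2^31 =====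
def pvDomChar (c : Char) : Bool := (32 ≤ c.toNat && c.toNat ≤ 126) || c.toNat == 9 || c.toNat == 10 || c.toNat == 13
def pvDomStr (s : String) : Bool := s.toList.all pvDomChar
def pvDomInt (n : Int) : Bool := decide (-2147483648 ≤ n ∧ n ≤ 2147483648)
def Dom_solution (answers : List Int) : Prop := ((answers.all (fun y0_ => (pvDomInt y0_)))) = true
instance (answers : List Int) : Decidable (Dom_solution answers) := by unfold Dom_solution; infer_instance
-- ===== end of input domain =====

-- B scores the three patterns from per-residue-class histograms (index mod 40, the
-- patterns' common period) built in one pass, instead of A's direct match counting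
-- (objective: alternative; same O(n) cost).

-- ===== PORT A =====
-- Literal port of A: one fold over range(len(answers)) carrying the triple of
-- counters; answers[i] and stk[i % len(stk)] are always in range, so pyGetD is exact.
def solution (answers : List Int) : List Int :=
  let st1 : List Int := [1, 2, 3, 4, 5]
  let st2 : List Int := [2, 1, 2, 3, 2, 4, 2, 5]
  let st3 : List Int := [3, 3, 1, 1, 2, 2, 4, 4, 5, 5]
  let right : Int × Int × Int :=
    (PySem.List.pyRange 0 (answers.length : Int) 1).foldl
      (fun (r : Int × Int × Int) i =>
        ((if PySem.List.pyGetD answers i 0 = PySem.List.pyGetD st1 (PySem.Int.mod i (st1.length : Int)) 0 then r.1 + 1 else r.1),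
         (if PySem.List.pyGetD answers i 0 = PySem.List.pyGetD st2 (PySem.Int.mod i (st2.length : Int)) 0 then r.2.1 + 1 else r.2.1),
         (if PySem.List.pyGetD answers i 0 = PySem.List.pyGetD st3 (PySem.Int.mod i (st3.length : Int)) 0 then r.2.2 + 1 else r.2.2)))
      (0, 0, 0)
  let rightL : List Int := [right.1, right.2.1, right.2.2]
  -- max(right) is recomputed on each loop iteration, as in A; the list is nonempty
  -- so Python's max never raises and maxD with any default is exact.
  let res : List Int :=
    (PySem.List.pyRange 0 (rightL.length : Int) 1).foldl
      (fun acc i =>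
        if PySem.List.pyGetD rightL i 0 = PySem.List.maxD rightL id 0 then acc ++ [i + 1] else acc)
      []
  PySem.List.sorted res id false

-- ===== PORT B =====
-- Hand-port of the aliased in-place update 'h = hist[i % L]; h[a] = h.get(a, 0) + 1':
-- replace cell j of the histogram list by its counter bumped at key a; exact since
-- 0 ≤ i % 40 < 40 = len(hist) (the list index never misses) and dict writes are
-- Dict.modify.
def pvListUpd : List (PySem.Dict Int Int) → Nat → Int → List (PySem.Dict Int Int)
  | [], _, _ => []
  | h :: t, 0, a => h.modify a 0 (· + 1) :: t
  | h :: t, Nat.succ j, a => h :: pvListUpd t j a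

def solution_alt (answers : List Int) : List Int :=
  let patterns : List (List Int) :=
    [[1, 2, 3, 4, 5], [2, 1, 2, 3, 2, 4, 2, 5], [3, 3, 1, 1, 2, 2, 4, 4, 5, 5]]
  let L : Int := 40
  let hist0 : List (PySem.Dict Int Int) := List.replicate 40 PySem.Dict.empty
  let hist : List (PySem.Dict Int Int) :=
    (PySem.List.enumerate answers 0).foldl
      (fun H ia => pvListUpd H (PySem.Int.mod ia.1 L).toNat ia.2) hist0
  -- sum(h.get(p[r % len(p)], 0) for r, h in enumerate(hist)); p[r % len(p)] in range.
  let scores : List Int := patterns.map (fun p =>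
    (PySem.List.enumerate hist 0).foldl
      (fun s rh => s + rh.2.getD (PySem.List.pyGetD p (PySem.Int.mod rh.1 (p.length : Int)) 0) 0)
      0)
  -- max(scores): scores has exactly three entries, so Python's max never raises.
  let best : Int := PySem.List.maxD scores id 0
  (PySem.List.enumerate scores 0).foldl
    (fun acc ks => if ks.2 = best then acc ++ [ks.1 + 1] else acc) []

-- ===== PRECONDITION & SPEC =====
def Spec_solution (answers : List Int) (out : List Int) : Prop := out = solution_alt answers
instance (answers : List Int) (out : List Int) : Decidable (Spec_solution answers out) := by unfold Spec_solution; infer_instance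

-- ===== CLAIM (what is proved, stated in full; the proofs are below) =====
def Claim_equal_solution : Prop := ∀ (answers : List Int), Dom_solution answers → Spec_solution answers (solution answers)

-- ===== LEMMAS AND PROOFS =====

-- The pattern value a position i must match: p[i % len(p)].
def pvKey (p : List Int) (i : Int) : Int :=
  PySem.List.pyGetD p (PySem.Int.mod i (p.length : Int)) 0

-- B's per-pattern read-off of a histogram list, as a sum.
def pvSsum (p : List Int) (s : Int) (hist : List (PySem.Dict Int Int)) : Int :=
  ((PySem.List.enumerate hist s).map (fun rh => rh.2.getD (pvKey p rh.1) 0)).sum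

-- The common count both programs compute for a pattern p.
def pvMatches (p : List Int) (answers : List Int) : Int :=
  ((PySem.List.enumerate answers 0).map
    (fun ia => if ia.2 = pvKey p ia.1 then (1 : Int) else 0)).sum

theorem pvSsum_cons (p : List Int) (s : Int) (h : PySem.Dict Int Int)
    (t : List (PySem.Dict Int Int)) :
    pvSsum p s (h :: t) = h.getD (pvKey p s) 0 + pvSsum p (s + 1) t := by
  simp [pvSsum, PySem.List.enumerate_cons]

theorem pvListUpd_length (t : List (PySem.Dict Int Int)) (j : Nat) (a : Int) :
    (pvListUpd t j a).length = t.length := by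
  induction t generalizing j with
  | nil => rfl
  | cons h t ih => cases j <;> simp [pvListUpd, ih]

theorem pvSsum_upd (p : List Int) (a s : Int) (hist : List (PySem.Dict Int Int))
    (j : Nat) (hj : j < hist.length) :
    pvSsum p s (pvListUpd hist j a)
      = pvSsum p s hist + (if a = pvKey p (s + (j : Int)) then 1 else 0) := by
  induction hist generalizing s j with
  | nil => simp at hj
  | cons h t ih =>
    cases j with
    | zero =>
      simp only [pvListUpd, pvSsum_cons, PySem.Dict.getD_modify, Nat.cast_zero, add_zero]
      rcases eq_or_ne (pvKey p s) a with hk | hk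
      · subst hk; simp; ring
      · rw [if_neg hk, if_neg (fun he => hk he.symm)]; ring
    | succ j =>
      simp only [pvListUpd, pvSsum_cons]
      rw [ih (s + 1) j (by simpa using hj)]
      have : s + 1 + (j : Int) = s + ((j : Nat) + 1 : Nat) := by push_cast; ring
      rw [this]; ring

theorem pvSsum_replicate (p : List Int) (s : Int) (n : Nat) :
    pvSsum p s (List.replicate n PySem.Dict.empty) = 0 := by
  induction n generalizing s with
  | zero => rfl
  | succ n ih =>
    rw [List.replicate_succ, pvSsum_cons, ih]
    simp [PySem.Dict.getD, PySem.Dict.get?, PySem.Dict.empty]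

theorem pv_mod_mod (lp : Int) (hlp : 0 < lp) (h : lp ∣ 40) (i : Int) :
    PySem.Int.mod (PySem.Int.mod i 40) lp = PySem.Int.mod i lp := by
  rw [PySem.Int.mod_eq_emod_of_pos hlp, PySem.Int.mod_eq_emod_of_pos hlp,
    PySem.Int.mod_eq_emod_of_pos (by norm_num : (0:Int) < 40)]
  exact Int.emod_emod_of_dvd i h

-- Building the histograms adds exactly the match count for every nonempty pattern
-- whose length divides the common period 40.
theorem pv_build_invariant (p : List Int) (hp : (p.length : Int) ∣ 40)
    (answers : List Int) (i0 : Int) (hist : List (PySem.Dict Int Int))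
    (hlen : hist.length = 40) :
    pvSsum p 0 ((PySem.List.enumerate answers i0).foldl
        (fun H ia => pvListUpd H (PySem.Int.mod ia.1 40).toNat ia.2) hist)
      = pvSsum p 0 hist
        + ((PySem.List.enumerate answers i0).map
            (fun ia => if ia.2 = pvKey p ia.1 then (1 : Int) else 0)).sum := by
  induction answers generalizing i0 hist with
  | nil => simp [PySem.List.enumerate_nil]
  | cons a t ih =>
    have hlp : 0 < p.length := by
      rcases Nat.eq_zero_or_pos p.length with h0 | h0
      · rw [h0] at hp; norm_num at hp
      · exact h0
    have hmnn : 0 ≤ PySem.Int.mod i0 40 := PySem.Int.mod_nonneg i0 (by norm_num)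
    have hmlt : PySem.Int.mod i0 40 < 40 := PySem.Int.mod_lt i0 (by norm_num)
    have hj : (PySem.Int.mod i0 40).toNat < hist.length := by
      rw [hlen]; omega
    rw [PySem.List.enumerate_cons]
    simp only [List.foldl_cons, List.map_cons, List.sum_cons]
    rw [ih (i0 + 1) _ (by rw [pvListUpd_length, hlen])]
    rw [pvSsum_upd p a 0 hist _ hj]
    have hcast : ((PySem.Int.mod i0 40).toNat : Int) = PySem.Int.mod i0 40 :=
      Int.toNat_of_nonneg hmnn
    have hkey : pvKey p (0 + ((PySem.Int.mod i0 40).toNat : Int)) = pvKey p i0 := by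
      rw [hcast, zero_add]
      unfold pvKey
      rw [pv_mod_mod (p.length : Int) (by exact_mod_cast hlp) hp i0]
    rw [hkey]; ring

-- B's score for pattern p equals pvMatches.
theorem pv_scoreB_eq (p : List Int) (hp : (p.length : Int) ∣ 40) (answers : List Int) :
    (PySem.List.enumerate
        ((PySem.List.enumerate answers 0).foldl
          (fun H ia => pvListUpd H (PySem.Int.mod ia.1 (40 : Int)).toNat ia.2)
          (List.replicate 40 PySem.Dict.empty)) 0).foldl
      (fun s rh => s + rh.2.getD (PySem.List.pyGetD p (PySem.Int.mod rh.1 (p.length : Int)) 0) 0) 0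
      = pvMatches p answers := by
  rw [PySem.List.foldl_add
    (g := fun rh : Int × PySem.Dict Int Int =>
      rh.2.getD (PySem.List.pyGetD p (PySem.Int.mod rh.1 (p.length : Int)) 0) 0)]
  rw [zero_add]
  have hb := pv_build_invariant p hp answers 0 (List.replicate 40 PySem.Dict.empty) (by simp)
  rw [pvSsum_replicate, zero_add] at hb
  simp only [pvSsum, pvKey] at hb
  simp only [pvMatches, pvKey]
  exact hb

-- A's single pass with three parallel counters is three independent folds.
theorem pv_foldl_triple (L : List Int) (c1 c2 c3 : Int → Prop) [DecidablePred c1]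
    [DecidablePred c2] [DecidablePred c3] (a b c : Int) :
    L.foldl (fun (r : Int × Int × Int) i =>
        ((if c1 i then r.1 + 1 else r.1), (if c2 i then r.2.1 + 1 else r.2.1),
         (if c3 i then r.2.2 + 1 else r.2.2))) (a, b, c)
      = (L.foldl (fun r i => if c1 i then r + 1 else r) a,
         L.foldl (fun r i => if c2 i then r + 1 else r) b,
         L.foldl (fun r i => if c3 i then r + 1 else r) c) := by
  induction L generalizing a b c with
  | nil => rfl
  | cons x xs ih => simp only [List.foldl]; rw [ih]

-- A fold 'if c then r+1 else r' is a 0/1 sum (Prop-condition form of foldl_count_if).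
theorem pv_foldl_ite (c : Int → Prop) [DecidablePred c] (l : List Int) (a : Int) :
    l.foldl (fun r i => if c i then r + 1 else r) a
      = a + (l.map (fun i => if c i then (1 : Int) else 0)).sum := by
  induction l generalizing a with
  | nil => simp
  | cons x t ih => simp only [List.foldl_cons, List.map_cons, List.sum_cons, ih]; split_ifs <;> ring

-- A's component fold over range(len(answers)) equals pvMatches.
theorem pv_scoreA_eq (p answers : List Int) :
    (PySem.List.pyRange 0 (answers.length : Int) 1).foldl
      (fun r i => if PySem.List.pyGetD answers i 0 = PySem.List.pyGetD p (PySem.Int.mod i (p.length : Int)) 0 then r + 1 else r) 0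
      = pvMatches p answers := by
  rw [pvMatches, PySem.List.enumerate_eq_map_pyRange (d := 0), List.map_map]
  rw [pv_foldl_ite (fun i => PySem.List.pyGetD answers i 0
      = PySem.List.pyGetD p (PySem.Int.mod i (p.length : Int)) 0), zero_add]
  simp only [pvKey, PySem.List.len_eq, Function.comp_def]
  rfl

-- Both tails build the same result from the same three scores.
theorem pv_tail (s1 s2 s3 : Int) :
    PySem.List.sorted
      ((PySem.List.pyRange 0 ((([s1, s2, s3] : List Int)).length : Int) 1).foldl
        (fun acc i =>
          if PySem.List.pyGetD [s1, s2, s3] i 0 = PySem.List.maxD [s1, s2, s3] id 0 then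
            acc ++ [i + 1] else acc) []) id false
    = (PySem.List.enumerate [s1, s2, s3] 0).foldl
        (fun acc ks =>
          if ks.2 = PySem.List.maxD [s1, s2, s3] id 0 then acc ++ [ks.1 + 1] else acc) [] := by
  norm_num [PySem.List.enumerate, PySem.List.pyGetD, PySem.List.pyIdx?, List.foldl,
    show PySem.List.pyRange 0 3 1 = [0, 1, 2] from by decide,
    show Int.toNat 2 = 2 from rfl, List.getElem_cons_succ, List.getElem_cons_zero]
  split_ifs <;> decide

theorem solution_eq_alt (answers : List Int) : solution answers = solution_alt answers := by
  simp only [solution, solution_alt, List.map]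
  rw [pv_foldl_triple]
  rw [pv_scoreA_eq [1,2,3,4,5] answers, pv_scoreA_eq [2,1,2,3,2,4,2,5] answers,
      pv_scoreA_eq [3,3,1,1,2,2,4,4,5,5] answers]
  simp only [pv_scoreB_eq [1,2,3,4,5] (by decide) answers,
             pv_scoreB_eq [2,1,2,3,2,4,2,5] (by decide) answers,
             pv_scoreB_eq [3,3,1,1,2,2,4,4,5,5] (by decide) answers]
  exact pv_tail _ _ _

-- ===== VERDICT (by name: the statement is the Claim_ definition above) =====
theorem solution_spec : Claim_equal_solution := by
  intro answers _
  exact solution_eq_alt answers
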